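-- pv_equiv track=rewrite | github.com/nyucel/blm2010 | final/170401073.py | xiyi
-- ===== SOURCE A (Python) =====
-- def xiyi(n):
--     liste2=[]
--     for i in range(len(n)):
--         x=0
--         for j in range(1,len(n)+1):
--             x+=(j**i)*(n[j-1])
--         liste2.append(x)
--     return liste2
-- ===== SOURCE B (Python) =====
-- def xiyi(n):
--     out = []
--     pw = list(n)
--     for _ in range(len(n)):
--         out.append(sum(pw))
--         pw = [p * j for j, p in enumerate(pw, 1)]
--     return out
-- ===== Notes on version B (the rewrite author's own statement) =====
-- stated objective: faster
-- what changed: Instead of recomputing j**i from scratch for every row, B keeps a vector of running powers j^i * n[j-1] and multiplies it elementwise by j between rows, so each row is just a sum.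
import Mathlib
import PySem

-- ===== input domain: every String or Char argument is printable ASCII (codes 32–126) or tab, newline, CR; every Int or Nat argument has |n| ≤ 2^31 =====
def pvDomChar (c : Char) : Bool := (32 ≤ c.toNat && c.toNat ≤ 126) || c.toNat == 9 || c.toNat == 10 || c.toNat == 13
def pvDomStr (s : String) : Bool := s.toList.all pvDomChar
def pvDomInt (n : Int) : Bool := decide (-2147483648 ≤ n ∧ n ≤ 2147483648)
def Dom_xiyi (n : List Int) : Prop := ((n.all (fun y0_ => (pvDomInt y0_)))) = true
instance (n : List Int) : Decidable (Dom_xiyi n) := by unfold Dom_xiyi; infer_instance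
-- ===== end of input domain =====

-- B replaces A's per-row recomputation of j**i by a running power vector updated with one multiplication per element per row (objective: faster).

-- ===== PORT A =====
-- n[j-1] is always in range (1 ≤ j ≤ len(n)), so pyGetD's default is never used.
def xiyi (n : List Int) : List Int :=
  (PySem.List.pyRange 0 (n.length : Int) 1).foldl (fun liste2 i =>
    liste2 ++ [(PySem.List.pyRange 1 ((n.length : Int) + 1) 1).foldl
      (fun x j => x + j ^ i.toNat * PySem.List.pyGetD n (j - 1) 0) 0]) []

-- ===== PORT B =====
-- pw = [p * j for j, p in enumerate(pw, 1)]
def xiyiStep (pw : List Int) : List Int :=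
  (PySem.List.enumerate pw 1).map (fun jp => jp.2 * jp.1)

-- the for-loop of Source B: each iteration appends sum(pw) and updates pw
def xiyiGo : Nat → List Int → List Int
  | 0, _ => []
  | k + 1, pw => pw.sum :: xiyiGo k (xiyiStep pw)

def xiyi_alt (n : List Int) : List Int := xiyiGo n.length n

-- ===== PRECONDITION & SPEC =====
def Spec_xiyi (n : List Int) (out : List Int) : Prop := out = xiyi_alt n
instance (n : List Int) (out : List Int) : Decidable (Spec_xiyi n out) := by unfold Spec_xiyi; infer_instance

-- ===== CLAIM (what is proved, stated in full; the proofs are below) =====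
def Claim_equal_xiyi : Prop := ∀ (n : List Int), Dom_xiyi n → Spec_xiyi n (xiyi n)

-- ===== LEMMAS AND PROOFS =====

/-- The power vector: element k is (k+1)^t * n[k]. -/
def pvPows (t : Nat) (n : List Int) : List Int :=
  (List.range n.length).map (fun (k : Nat) => ((1 : Int) + (k : Int)) ^ t * PySem.List.pyGetD n (k : Int) 0)

theorem pvPows_zero (n : List Int) : pvPows 0 n = n := by
  apply List.ext_getElem
  · simp [pvPows]
  · intro k h1 h2
    simp only [pvPows, List.getElem_map, List.getElem_range, pow_zero, one_mul,
      PySem.List.pyGetD_natCast]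
    exact List.getD_eq_getElem n 0 h2

theorem pvPows_length (t : Nat) (n : List Int) : (pvPows t n).length = n.length := by
  simp [pvPows]

theorem step_pvPows (t : Nat) (n : List Int) :
    xiyiStep (pvPows t n) = pvPows (t + 1) n := by
  apply List.ext_getElem
  · simp [xiyiStep, pvPows, PySem.List.length_enumerate]
  · intro k h1 h2
    have hk : k < n.length := by
      simpa [xiyiStep, PySem.List.length_enumerate, pvPows_length] using h1
    simp only [xiyiStep, List.getElem_map, PySem.List.getElem_enumerate, pvPows,
      List.getElem_range]
    ring

theorem go_pvPows (k t : Nat) (n : List Int) :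
    xiyiGo k (pvPows t n) = (List.range k).map (fun s => (pvPows (t + s) n).sum) := by
  induction k generalizing t with
  | zero => simp [xiyiGo]
  | succ k ih =>
      rw [List.range_succ_eq_map]
      simp only [xiyiGo, step_pvPows, ih, List.map_cons, List.map_map]
      congr 1
      apply List.map_congr_left
      intro a _
      simp only [Function.comp_apply]
      have h : t + 1 + a = t + (a + 1) := by omega
      rw [h]

theorem inner_eq (n : List Int) (t : Nat) :
    (PySem.List.pyRange 1 ((n.length : Int) + 1) 1).foldl
      (fun x j => x + j ^ t * PySem.List.pyGetD n (j - 1) 0) 0 = (pvPows t n).sum := by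
  rw [PySem.List.foldl_add, PySem.List.pyRange_one, pvPows]
  simp only [add_sub_cancel_right, Int.toNat_natCast, List.map_map, zero_add]
  congr 1
  apply List.map_congr_left
  intro k _
  simp only [Function.comp_apply, add_sub_cancel_left]

-- ===== VERDICT (by name: the statement is the Claim_ definition above) =====
theorem xiyi_spec : Claim_equal_xiyi := by
  intro n _
  unfold Spec_xiyi xiyi xiyi_alt
  rw [PySem.List.foldl_append_singleton_eq_map, List.nil_append,
    PySem.List.pyRange_one 0 (n.length : Int)]
  simp only [Int.sub_zero, Int.toNat_natCast, List.map_map]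
  conv_rhs => rw [← pvPows_zero n]
  rw [go_pvPows, pvPows_length]
  apply List.map_congr_left
  intro t _
  simp only [Function.comp_apply, zero_add, Int.toNat_natCast]
  rw [inner_eq]
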